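-- pv_equiv track=rewrite | github.com/cesasol/dynamic_prompt_nodes | src/nodes/cleanup.py | _tokenize_keywords
-- ===== SOURCE A (Python) =====
-- def _tokenize_keywords(prompt: str) -> list[str]:
--     """Split prompt into comma-separated keywords respecting nesting of () and []."""
--     tokens: list[str] = []
--     current: list[str] = []
--     depth = 0
--     for ch in prompt:
--         if ch in "([":
--             depth += 1
--             current.append(ch)
--         elif ch in ")]":
--             depth -= 1
--             current.append(ch)
--         elif ch == "," and depth == 0:
--             tokens.append("".join(current))
--             current = []
--         else:
--             current.append(ch)
--     if current or (not tokens and not prompt):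
--         tokens.append("".join(current))
--     return tokens
-- ===== SOURCE B (Python) =====
-- def _tokenize_keywords(prompt: str) -> list[str]:
--     """Split prompt into comma-separated keywords respecting nesting of () and []."""
--     cuts = [0]
--     depth = 0
--     for i, ch in enumerate(prompt):
--         if ch in "([":
--             depth += 1
--         elif ch in ")]":
--             depth -= 1
--         elif ch == "," and depth == 0:
--             cuts.append(i + 1)
--     segments = [prompt[a:b - 1] for a, b in zip(cuts, cuts[1:])]
--     segments.append(prompt[cuts[-1]:])
--     if len(segments) > 1 and segments[-1] == "":
--         segments.pop()
--     return segments
-- ===== Notes on version B (the rewrite author's own statement) =====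
-- stated objective: alternative
-- what changed: A accumulates characters into a growing buffer and emits a token at each top-level comma; B instead records the index after every depth-0 comma in one pass and then slices the prompt between consecutive cut positions, dropping the single trailing empty segment a trailing top-level comma produces.
import Mathlib
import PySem

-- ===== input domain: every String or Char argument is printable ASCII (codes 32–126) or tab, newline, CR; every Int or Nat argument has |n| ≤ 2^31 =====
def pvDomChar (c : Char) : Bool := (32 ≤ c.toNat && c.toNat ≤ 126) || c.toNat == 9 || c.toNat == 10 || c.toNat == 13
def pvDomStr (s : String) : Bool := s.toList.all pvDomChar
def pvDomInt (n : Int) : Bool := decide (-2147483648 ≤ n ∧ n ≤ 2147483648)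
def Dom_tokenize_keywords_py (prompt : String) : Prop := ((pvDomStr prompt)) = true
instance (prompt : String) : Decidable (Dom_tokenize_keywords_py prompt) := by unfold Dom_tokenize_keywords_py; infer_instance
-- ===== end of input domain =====

-- B replaces A's accumulate-characters loop by a two-pass scheme (collect top-level comma
-- positions, then slice the prompt between them); objective: a different decomposition
-- ("alternative"), not speed.

-- ===== PORT A =====
-- the body of A's `for ch in prompt` loop, on state (tokens, current, depth)
def tkStepA (s : List String × List Char × Int) (ch : Char) : List String × List Char × Int :=
  if ch = '(' ∨ ch = '[' then (s.1, s.2.1 ++ [ch], s.2.2 + 1)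
  else if ch = ')' ∨ ch = ']' then (s.1, s.2.1 ++ [ch], s.2.2 - 1)
  else if ch = ',' ∧ s.2.2 = 0 then (s.1 ++ [String.ofList s.2.1], [], s.2.2)
  else (s.1, s.2.1 ++ [ch], s.2.2)

def tokenize_keywords_py (prompt : String) : List String :=
  let st := prompt.toList.foldl tkStepA ([], [], 0)
  -- `if current or (not tokens and not prompt): tokens.append("".join(current))`
  if st.2.1 ≠ [] ∨ (st.1 = [] ∧ prompt.toList = []) then st.1 ++ [String.ofList st.2.1] else st.1

-- ===== PORT B =====
-- the body of Source B's `for i, ch in enumerate(prompt)` loop, on state (cuts, depth)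
def tkStepB (s : List Int × Int) (p : Int × Char) : List Int × Int :=
  if p.2 = '(' ∨ p.2 = '[' then (s.1, s.2 + 1)
  else if p.2 = ')' ∨ p.2 = ']' then (s.1, s.2 - 1)
  else if p.2 = ',' ∧ s.2 = 0 then (s.1 ++ [p.1 + 1], s.2)
  else s

-- Source B's comprehension `[prompt[a:b-1] for a, b in zip(cuts, cuts[1:])]`
def tkSegsOf (cs : List Char) (cuts : List Int) : List String :=
  (cuts.zip cuts.tail).map (fun ab => String.ofList (PySem.List.slice cs (some ab.1) (some (ab.2 - 1))))

def tokenize_keywords_py_alt (prompt : String) : List String :=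
  let cs := prompt.toList
  let st := (PySem.List.enumerate cs 0).foldl tkStepB ([0], 0)
  let cuts := st.1
  -- cuts is nonempty (it starts as [0]), so cuts[-1] is its last element
  let segments := tkSegsOf cs cuts ++ [String.ofList (PySem.List.slice cs (some (cuts.getLastD 0)) none)]
  if 1 < segments.length ∧ segments.getLast? = some "" then segments.dropLast else segments

-- ===== PRECONDITION & SPEC =====
def Spec_tokenize_keywords_py (prompt : String) (out : List String) : Prop := out = tokenize_keywords_py_alt prompt
instance (prompt : String) (out : List String) : Decidable (Spec_tokenize_keywords_py prompt out) := by unfold Spec_tokenize_keywords_py; infer_instance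

-- ===== CLAIM (what is proved, stated in full; the proofs are below) =====
def Claim_equal_tokenize_keywords_py : Prop := ∀ (prompt : String), Dom_tokenize_keywords_py prompt → Spec_tokenize_keywords_py prompt (tokenize_keywords_py prompt)

-- ===== LEMMAS AND PROOFS =====

lemma tk_zip_tail_append {α : Type} (u : List α) (hu : u ≠ []) (b : α) :
    (u ++ [b]).zip (u ++ [b]).tail = u.zip u.tail ++ [(u.getLast hu, b)] := by
  induction u with
  | nil => exact absurd rfl hu
  | cons x v ih =>
    cases v with
    | nil => simp
    | cons y w =>
      have h := ih (by simp)
      simp only [List.cons_append, List.tail_cons, List.zip_cons_cons] at *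
      simp [h, List.getLast]

lemma tk_segsOf_append (cs : List Char) (cuts : List Int) (k : Nat) (m : Int)
    (hne : cuts ≠ []) (h : cuts.getLast? = some (k : Int)) :
    tkSegsOf cs (cuts ++ [m]) =
      tkSegsOf cs cuts ++ [String.ofList (PySem.List.slice cs (some (k : Int)) (some (m - 1)))] := by
  have hl : cuts.getLast hne = (k : Int) := by
    have h' := h
    rw [List.getLast?_eq_some_getLast hne] at h'
    exact Option.some.inj h'
  simp [tkSegsOf, tk_zip_tail_append cuts hne m, hl]

lemma tk_take_snoc (cs : List Char) (k n : Nat) (ch : Char) (t : List Char)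
    (hk : k ≤ n) (h : cs.drop n = ch :: t) :
    (cs.drop k).take (n + 1 - k) = (cs.drop k).take (n - k) ++ [ch] := by
  have h2 : (cs.drop k).drop (n - k) = ch :: t := by
    rw [List.drop_drop, show k + (n - k) = n by omega]
    exact h
  have h3 : (cs.drop k).take (n - k + 1) = (cs.drop k).take (n - k) ++ ((cs.drop k).drop (n - k)).take 1 := by
    rw [← List.take_add]
  rw [show n + 1 - k = n - k + 1 by omega, h3, h2]
  simp

-- the loop invariant: A's fold state is determined by B's cut list
lemma tk_main : ∀ (l cs : List Char) (n k : Nat) (tokens : List String) (cuts : List Int) (d : Int),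
    cs.drop n = l → cuts ≠ [] → cuts.getLast? = some (k : Int) → k ≤ n →
    tokens = tkSegsOf cs cuts →
    ∃ k' : Nat,
      l.foldl tkStepA (tokens, (cs.drop k).take (n - k), d)
        = (tkSegsOf cs ((PySem.List.enumerate l (n : Int)).foldl tkStepB (cuts, d)).1,
           (cs.drop k').take (n + l.length - k'),
           ((PySem.List.enumerate l (n : Int)).foldl tkStepB (cuts, d)).2)
      ∧ ((PySem.List.enumerate l (n : Int)).foldl tkStepB (cuts, d)).1.getLast? = some (k' : Int)
      ∧ k' ≤ n + l.length
      ∧ ((PySem.List.enumerate l (n : Int)).foldl tkStepB (cuts, d)).1.head? = cuts.head?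
      ∧ ((PySem.List.enumerate l (n : Int)).foldl tkStepB (cuts, d)).1 ≠ [] := by
  intro l
  induction l with
  | nil =>
    intro cs n k tokens cuts d hdrop hne hlast hk htok
    exact ⟨k, by simp [PySem.List.enumerate_nil, htok], hlast, by omega, rfl, hne⟩
  | cons ch t ih =>
    intro cs n k tokens cuts d hdrop hne hlast hk htok
    have hdrop' : cs.drop (n + 1) = t := by
      rw [← List.drop_drop, hdrop]
      rfl
    have hsnoc := tk_take_snoc cs k n ch t hk hdrop
    have henum : PySem.List.enumerate (ch :: t) (n : Int)
        = ((n : Int), ch) :: PySem.List.enumerate t (((n + 1 : Nat) : Int)) := by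
      rw [PySem.List.enumerate_cons]
      push_cast
      ring_nf
    rw [henum]
    simp only [List.foldl_cons, List.length_cons]
    by_cases h1 : ch = '(' ∨ ch = '['
    · have sA : tkStepA (tokens, (cs.drop k).take (n - k), d) ch
          = (tokens, (cs.drop k).take (n - k) ++ [ch], d + 1) := by
        unfold tkStepA; rw [if_pos h1]
      have sB : tkStepB (cuts, d) ((n : Int), ch) = (cuts, d + 1) := by
        unfold tkStepB; rw [if_pos h1]
      rw [sA, sB, ← hsnoc]
      obtain ⟨k', H1, H2, H3, H4, H5⟩ := ih cs (n + 1) k tokens cuts (d + 1) hdrop' hne hlast (by omega) htok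
      refine ⟨k', ?_, H2, by omega, H4, H5⟩
      rw [show n + (t.length + 1) - k' = n + 1 + t.length - k' by omega]
      exact H1
    · by_cases h2 : ch = ')' ∨ ch = ']'
      · have sA : tkStepA (tokens, (cs.drop k).take (n - k), d) ch
            = (tokens, (cs.drop k).take (n - k) ++ [ch], d - 1) := by
          unfold tkStepA; rw [if_neg h1, if_pos h2]
        have sB : tkStepB (cuts, d) ((n : Int), ch) = (cuts, d - 1) := by
          unfold tkStepB; rw [if_neg h1, if_pos h2]
        rw [sA, sB, ← hsnoc]
        obtain ⟨k', H1, H2, H3, H4, H5⟩ := ih cs (n + 1) k tokens cuts (d - 1) hdrop' hne hlast (by omega) htok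
        refine ⟨k', ?_, H2, by omega, H4, H5⟩
        rw [show n + (t.length + 1) - k' = n + 1 + t.length - k' by omega]
        exact H1
      · by_cases h3 : ch = ',' ∧ d = 0
        · have sA : tkStepA (tokens, (cs.drop k).take (n - k), d) ch
              = (tokens ++ [String.ofList ((cs.drop k).take (n - k))], [], d) := by
            unfold tkStepA; rw [if_neg h1, if_neg h2, if_pos h3]
          have sB : tkStepB (cuts, d) ((n : Int), ch) = (cuts ++ [(n : Int) + 1], d) := by
            unfold tkStepB; rw [if_neg h1, if_neg h2, if_pos h3]
          rw [sA, sB]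
          have hlast' : (cuts ++ [(n : Int) + 1]).getLast? = some (((n + 1 : Nat) : Int)) := by
            rw [List.getLast?_append]
            push_cast
            rfl
          have hseg := tk_segsOf_append cs cuts k ((n : Int) + 1) hne hlast
          have hsl : PySem.List.slice cs (some (k : Int)) (some ((n : Int) + 1 - 1)) = (cs.drop k).take (n - k) := by
            rw [show (n : Int) + 1 - 1 = (n : Int) by ring]
            exact PySem.List.slice_natCast cs k n
          obtain ⟨k', H1, H2, H3, H4, H5⟩ :=
            ih cs (n + 1) (n + 1) (tokens ++ [String.ofList ((cs.drop k).take (n - k))])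
              (cuts ++ [(n : Int) + 1]) d hdrop' (by simp) hlast' (le_refl _)
              (by rw [hseg, hsl, htok])
          simp only [Nat.sub_self, List.take_zero] at H1
          refine ⟨k', ?_, H2, by omega, ?_, H5⟩
          · rw [show n + (t.length + 1) - k' = n + 1 + t.length - k' by omega]
            exact H1
          · rw [H4]
            cases cuts with
            | nil => exact absurd rfl hne
            | cons a u => simp
        · have sA : tkStepA (tokens, (cs.drop k).take (n - k), d) ch
              = (tokens, (cs.drop k).take (n - k) ++ [ch], d) := by
            unfold tkStepA; rw [if_neg h1, if_neg h2, if_neg h3]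
          have sB : tkStepB (cuts, d) ((n : Int), ch) = (cuts, d) := by
            unfold tkStepB; rw [if_neg h1, if_neg h2, if_neg h3]
          rw [sA, sB, ← hsnoc]
          obtain ⟨k', H1, H2, H3, H4, H5⟩ := ih cs (n + 1) k tokens cuts d hdrop' hne hlast (by omega) htok
          refine ⟨k', ?_, H2, by omega, H4, H5⟩
          rw [show n + (t.length + 1) - k' = n + 1 + t.length - k' by omega]
          exact H1

lemma tk_ofList_eq_empty (c : List Char) : String.ofList c = "" ↔ c = [] := by
  constructor
  · intro h
    have := congrArg String.toList h
    simpa using this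
  · intro h
    subst h
    rfl

-- ===== VERDICT (by name: the statement is the Claim_ definition above) =====
theorem tokenize_keywords_py_spec : Claim_equal_tokenize_keywords_py := by
  intro prompt _
  simp only [Spec_tokenize_keywords_py, tokenize_keywords_py, tokenize_keywords_py_alt]
  obtain ⟨k', H1, H2, H3, H4, H5⟩ :=
    tk_main prompt.toList prompt.toList 0 0 [] [0] 0 rfl (by simp) (by simp) (le_refl _) (by simp [tkSegsOf])
  simp only [Nat.cast_zero, Nat.zero_add, Nat.sub_zero, List.drop_zero, List.take_zero] at H1 H2 H4 H5
  generalize hR : (PySem.List.enumerate prompt.toList (0 : Int)).foldl tkStepB ([0], 0) = R at H1 H2 H4 H5 ⊢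
  obtain ⟨C, df⟩ := R
  simp only at H1 H2 H4 H5 ⊢
  have hdropall : (prompt.toList.drop k').take (prompt.toList.length - k') = prompt.toList.drop k' :=
    List.take_of_length_le (by simp)
  rw [hdropall] at H1
  have hlastD : C.getLastD 0 = (k' : Int) := by
    rw [List.getLastD_eq_getLast?, H2]
    rfl
  rw [H1, hlastD, PySem.List.slice_from_natCast]
  by_cases hcnil : prompt.toList.drop k' = []
  · by_cases hTnil : tkSegsOf prompt.toList C = []
    -- no top-level comma was ever seen: C is still [0], so the last segment is all of cs and cs = []
    · have hzero : (C.zip C.tail).length = 0 := by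
        have := congrArg List.length hTnil
        simpa [tkSegsOf] using this
      rcases C with _ | ⟨x, v⟩
      · cases H5 rfl
      · rcases v with _ | ⟨y, w⟩
        · have hx0 : x = 0 := by simpa using H4
          have hxk : x = (k' : Int) := by simpa using H2
          have hk0 : k' = 0 := by omega
          subst hk0
          have hcs0 : prompt.toList = [] := by simpa using hcnil
          subst hx0
          simp [hcs0, tkSegsOf]
        · simp at hzero
    · -- trailing empty segment after a top-level comma: A never appends it, B pops it
      rw [if_neg (fun h => h.elim (fun h1 => h1 hcnil) (fun h2 => hTnil h2.1))]
      have hBcond : 1 < (tkSegsOf prompt.toList C ++ [String.ofList (prompt.toList.drop k')]).length ∧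
          (tkSegsOf prompt.toList C ++ [String.ofList (prompt.toList.drop k')]).getLast? = some "" := by
        constructor
        · have hp : 0 < (tkSegsOf prompt.toList C).length := List.length_pos_of_ne_nil hTnil
          rw [List.length_append]
          simp
          omega
        · rw [List.getLast?_append, hcnil]
          rfl
      rw [if_pos hBcond]
      simp
  · -- last segment nonempty: both keep it
    rw [if_pos (Or.inl hcnil)]
    have hBcond : ¬ (1 < (tkSegsOf prompt.toList C ++ [String.ofList (prompt.toList.drop k')]).length ∧
        (tkSegsOf prompt.toList C ++ [String.ofList (prompt.toList.drop k')]).getLast? = some "") := by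
      rintro ⟨-, h2⟩
      rw [List.getLast?_append] at h2
      exact hcnil ((tk_ofList_eq_empty (prompt.toList.drop k')).mp (Option.some.inj h2))
    rw [if_neg hBcond]
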